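-- pv_equiv track=rewrite | github.com/AbdAlrhmanQarahBolad/fastapi-app-KBS-OTC | main.py | split_by_every_second_space
-- ===== SOURCE A (Python) =====
-- def split_by_every_second_space(string):
--     # Split the string by spaces
--     words = string.split(' ')
--
--     # Initialize variables
--     substrings = []
--     current_group = []
--
--     # Iterate through words and group them
--     for i, word in enumerate(words):
--         current_group.append(word)
--         # Every second space (i.e., every two words) create a new substring
--         if (i + 1) % 2 == 0:
--             substrings.append(' '.join(current_group))
--             current_group = []
--
--     # If there are remaining words that didn't form a complete group
--     if current_group:
--         substrings.append(' '.join(current_group))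
--
--     return substrings
-- ===== SOURCE B (Python) =====
-- def split_by_every_second_space(string):
--     words = string.split(' ')
--     return [' '.join(words[i:i + 2]) for i in range(0, len(words), 2)]
-- ===== Notes on version B (the rewrite author's own statement) =====
-- stated objective: simpler
-- what changed: Replaced the word-by-word accumulate-and-flush loop (current_group, (i+1)%2 gate, post-loop remainder branch) with a single comprehension that joins words[i:i+2] for i stepping by 2, the trailing slice handling an odd leftover word automatically.
import Mathlib
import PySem

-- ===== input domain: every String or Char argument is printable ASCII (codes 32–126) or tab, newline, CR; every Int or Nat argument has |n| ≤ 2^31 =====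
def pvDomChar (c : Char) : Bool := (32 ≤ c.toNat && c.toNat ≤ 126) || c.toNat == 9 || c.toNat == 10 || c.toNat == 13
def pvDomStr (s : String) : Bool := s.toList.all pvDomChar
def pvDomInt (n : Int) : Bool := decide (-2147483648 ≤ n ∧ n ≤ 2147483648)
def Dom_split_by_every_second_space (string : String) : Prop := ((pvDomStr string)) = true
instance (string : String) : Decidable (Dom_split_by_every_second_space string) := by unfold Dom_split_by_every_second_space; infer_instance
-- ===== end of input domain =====

-- B replaces A's accumulate-and-flush word loop by mapping ' '.join over the length-2 slices at even indices (objective: simpler).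

-- ===== PORT A =====
-- split? returns none only for an empty separator; A's separator is the literal " ",
-- so the .getD [] default is never taken.
def split_by_every_second_space (string : String) : List String :=
  let words := (PySem.Str.split? string " ").getD []
  let st := (PySem.List.enumerate words).foldl
    (fun (st : List String × List String) (iw : Int × String) =>
      let cur := st.2 ++ [iw.2]
      if PySem.Int.mod (iw.1 + 1) 2 == 0 then
        (st.1 ++ [PySem.Str.join " " cur], [])
      else
        (st.1, cur))
    ([], [])
  if st.2 = [] then st.1 else st.1 ++ [PySem.Str.join " " st.2]

-- ===== PORT B =====
def split_by_every_second_space_alt (string : String) : List String :=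
  let words := (PySem.Str.split? string " ").getD []
  (PySem.List.pyRange 0 (words.length : Int) 2).map
    (fun i => PySem.Str.join " " (PySem.List.slice words (some i) (some (i + 2))))

-- ===== PRECONDITION & SPEC =====
def Spec_split_by_every_second_space (string : String) (out : List String) : Prop := out = split_by_every_second_space_alt string
instance (string : String) (out : List String) : Decidable (Spec_split_by_every_second_space string out) := by unfold Spec_split_by_every_second_space; infer_instance

-- ===== CLAIM (what is proved, stated in full; the proofs are below) =====
def Claim_equal_split_by_every_second_space : Prop := ∀ (string : String), Dom_split_by_every_second_space string → Spec_split_by_every_second_space string (split_by_every_second_space string)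

-- ===== LEMMAS AND PROOFS =====

-- the common value both ports compute: the words grouped two by two, ' '-joined
def pvPairs : List String → List String
  | [] => []
  | [w] => [PySem.Str.join " " [w]]
  | w1 :: w2 :: rest => PySem.Str.join " " [w1, w2] :: pvPairs rest

theorem pvEnumCons {α : Type} (x : α) (xs : List α) (i : Int) :
    PySem.List.enumerate (x :: xs) i = (i, x) :: PySem.List.enumerate xs (i + 1) := by
  simp [PySem.List.enumerate]

-- A's loop body, with the `let` zeta-reduced (definitionally equal to the port's lambda)
def pvStep (st : List String × List String) (iw : Int × String) : List String × List String :=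
  if PySem.Int.mod (iw.1 + 1) 2 == 0 then (st.1 ++ [PySem.Str.join " " (st.2 ++ [iw.2])], [])
  else (st.1, st.2 ++ [iw.2])

theorem pvStepEven (a b : List String) (k : Int) (w : String) :
    pvStep (a, b) (2*k, w) = (a, b ++ [w]) := by
  simp [pvStep, PySem.Int.mod, Int.fmod_eq_emod]

theorem pvStepOdd (a b : List String) (k : Int) (w : String) :
    pvStep (a, b) (2*k + 1, w) = (a ++ [PySem.Str.join " " (b ++ [w])], []) := by
  simp [pvStep, PySem.Int.mod, Int.fmod_eq_emod]
  omega

-- A's loop, started at any even index with an empty current group, appends pvPairs ws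
theorem pvFold (ws : List String) : ∀ (k : Int) (acc : List String),
    (let st := (PySem.List.enumerate ws (2*k)).foldl pvStep (acc, []);
     if st.2 = [] then st.1 else st.1 ++ [PySem.Str.join " " st.2]) = acc ++ pvPairs ws := by
  induction ws using pvPairs.induct with
  | case1 =>
      intro k acc
      simp [PySem.List.enumerate, pvPairs]
  | case2 w =>
      intro k acc
      rw [pvEnumCons]
      simp only [PySem.List.enumerate, List.foldl_cons, List.foldl_nil, pvStepEven]
      simp [pvPairs]
  | case3 w1 w2 rest ih =>
      intro k acc
      rw [pvEnumCons, pvEnumCons]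
      simp only [List.foldl_cons, pvStepEven, List.nil_append, pvStepOdd]
      have h2 : (2*k + 1 + 1) = 2*(k+1) := by ring
      rw [h2]
      have h3 := ih (k+1) (acc ++ [PySem.Str.join " " ([w1] ++ [w2])])
      exact h3.trans (by simp [pvPairs])

theorem pvPyR (m : Int) (h : 0 ≤ m) :
    PySem.List.pyRange 0 m 2 = (List.range ((m+1)/2).toNat).map (fun k : ℕ => (2:Int)*(k:Int)) := by
  simp only [PySem.List.pyRange, if_neg (by norm_num : ¬(2:Int) = 0)]
  rcases lt_or_eq_of_le h with h1 | h1
  · rw [if_pos (by norm_num : (0:Int) < 2), if_pos h1]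
    have h2 : (m - 0 + 2 - 1) / 2 = (m + 1) / 2 := by omega
    rw [h2]
    simp
  · simp [← h1]

theorem pvPyRcons (n : ℕ) :
    PySem.List.pyRange 0 ((n:Int)+2) 2 = 0 :: (PySem.List.pyRange 0 (n:Int) 2).map (·+2) := by
  rw [pvPyR _ (by omega), pvPyR _ (by omega)]
  have hc : (((n:Int)+2+1)/2).toNat = (((n:Int)+1)/2).toNat + 1 := by omega
  rw [hc, List.range_succ_eq_map]
  simp only [List.map_cons, List.map_map, Nat.cast_zero, mul_zero]
  refine congrArg _ (List.map_congr_left fun a _ => ?_)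
  simp [Function.comp]
  ring

theorem pvRangeNonneg (n : Int) (hn : 0 ≤ n) (i : Int) (h : i ∈ PySem.List.pyRange 0 n 2) :
    0 ≤ i := by
  rw [pvPyR n hn] at h
  simp only [List.mem_map] at h
  obtain ⟨a, _, rfl⟩ := h
  positivity

theorem pvSlice0 (w1 w2 : String) (rest : List String) :
    PySem.List.slice (w1 :: w2 :: rest) (some 0) (some (0+2)) = [w1, w2] := by
  simp [PySem.List.slice, PySem.List.clampIdx]

theorem pvSlice1 (w : String) :
    PySem.List.slice [w] (some 0) (some (0+2)) = [w] := by
  simp [PySem.List.slice, PySem.List.clampIdx]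

theorem pvSliceShift (w1 w2 : String) (rest : List String) (a : Int) (h : 0 ≤ a) :
    PySem.List.slice (w1 :: w2 :: rest) (some (a+2)) (some (a+2+2)) =
    PySem.List.slice rest (some a) (some (a+2)) := by
  simp only [PySem.List.slice, PySem.List.clampIdx]
  rw [if_neg (by omega), if_neg (by omega), if_neg (by omega), if_neg (by omega)]
  have h1 : min (a+2).toNat (w1 :: w2 :: rest).length = min a.toNat rest.length + 2 := by
    simp; omega
  have h2 : min (a+2+2).toNat (w1 :: w2 :: rest).length = min (a+2).toNat rest.length + 2 := by
    simp; omega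
  rw [h1, h2]
  have h3 : min (a+2).toNat rest.length + 2 - (min a.toNat rest.length + 2)
      = min (a+2).toNat rest.length - min a.toNat rest.length := by omega
  rw [h3]
  rfl

-- B's slice-and-join map also computes pvPairs ws
theorem pvAlt (ws : List String) :
    (PySem.List.pyRange 0 (ws.length : Int) 2).map
      (fun i => PySem.Str.join " " (PySem.List.slice ws (some i) (some (i + 2)))) = pvPairs ws := by
  induction ws using pvPairs.induct with
  | case1 =>
      simp [pvPyR 0 le_rfl, pvPairs]
  | case2 w =>
      have : PySem.List.pyRange 0 ((([w] : List String).length : Int)) 2 = [0] := by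
        rw [pvPyR _ (by simp)]
        norm_num
      rw [this]
      simp only [List.map_cons, List.map_nil, pvSlice1]
      simp [pvPairs]
  | case3 w1 w2 rest ih =>
      have hlen : (((w1 :: w2 :: rest : List String).length : Int)) = ((rest.length : Int)) + 2 := by
        simp; ring
      rw [hlen, pvPyRcons rest.length]
      simp only [List.map_cons, List.map_map]
      rw [pvSlice0]
      refine congrArg₂ _ rfl ?_
      rw [← ih]
      refine List.map_congr_left fun a ha => ?_
      have ha0 : 0 ≤ a := pvRangeNonneg _ (by positivity) a ha
      simp only [Function.comp_apply]
      rw [pvSliceShift w1 w2 rest a ha0]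

-- ===== VERDICT (by name: the statement is the Claim_ definition above) =====
theorem split_by_every_second_space_spec : Claim_equal_split_by_every_second_space := by
  intro s _
  unfold Spec_split_by_every_second_space
  unfold split_by_every_second_space split_by_every_second_space_alt
  rw [pvAlt]
  show (let st := (PySem.List.enumerate ((PySem.Str.split? s " ").getD [])).foldl pvStep ([], []);
        if st.2 = [] then st.1 else st.1 ++ [PySem.Str.join " " st.2])
      = pvPairs ((PySem.Str.split? s " ").getD [])
  have h := pvFold ((PySem.Str.split? s " ").getD []) 0 []
  simpa using h
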